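-- pv_equiv track=rewrite | github.com/thien201/liecenseplate | run.py | convert
-- ===== SOURCE A (Python) =====
-- def convert(candidates):
--     first_line = []
--     second_line = []
--
--     for candidate, coordinate in candidates:
--         if coordinate[0] < 100:
--             first_line.append((candidate, coordinate[1]))
--         elif coordinate[0] > 100:
--             second_line.append((candidate, coordinate[1]))
--
--     def take_second(s):
--         return s[1]
--
--     first_line = sorted(first_line, reverse=False, key=take_second)
--     second_line = sorted(second_line, reverse=False, key=take_second)
--
--     if len(second_line) == 0:
--         license_plate = "".join([str(ele[0]) for ele in first_line])
--     else:
--         license_plate = "".join([str(ele[0]) for ele in first_line]) + "-" + "".join(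
--             [str(ele[0]) for ele in second_line])
--
--     return license_plate
-- ===== SOURCE B (Python) =====
-- def convert(candidates):
--     rest = [c for c in candidates if c[1][0] != 100]
--
--     def extract_min(items):
--         # the first item with minimal y-coordinate, and the remaining items in order
--         best = 0
--         for i in range(1, len(items)):
--             if items[i][1][1] < items[best][1][1]:
--                 best = i
--         return items[best], items[:best] + items[best + 1:]
--
--     first_line = []
--     second_line = []
--     while rest:
--         (candidate, coordinate), rest = extract_min(rest)
--         if coordinate[0] < 100:
--             first_line.append(candidate)
--         else:
--             second_line.append(candidate)
--
--     license_plate = "".join(first_line)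
--     if second_line:
--         license_plate += "-" + "".join(second_line)
--     return license_plate
-- ===== Notes on version B (the rewrite author's own statement) =====
-- stated objective: alternative
-- what changed: Replaces the partition-then-two-library-sorts pipeline by a selection sort: after filtering out x==100 candidates once, it repeatedly extracts the first minimum-y candidate from the remaining list and dispatches it directly into the first or second line; first-minimum selection is stable, so the per-line orders agree with A's stable sorts.
import Mathlib
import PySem

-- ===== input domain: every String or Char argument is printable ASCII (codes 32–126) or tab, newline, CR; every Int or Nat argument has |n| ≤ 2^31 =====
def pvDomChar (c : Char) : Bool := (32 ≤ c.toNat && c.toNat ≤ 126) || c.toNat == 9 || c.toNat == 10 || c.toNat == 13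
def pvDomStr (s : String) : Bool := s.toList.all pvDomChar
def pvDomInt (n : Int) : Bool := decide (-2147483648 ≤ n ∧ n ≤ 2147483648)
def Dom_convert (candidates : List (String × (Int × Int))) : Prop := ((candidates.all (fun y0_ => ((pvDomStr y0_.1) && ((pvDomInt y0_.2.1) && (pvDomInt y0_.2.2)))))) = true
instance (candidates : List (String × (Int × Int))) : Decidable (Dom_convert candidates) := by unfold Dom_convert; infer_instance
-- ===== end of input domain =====

-- B replaces the two library sorts over partitioned (candidate, y) pairs by a selection
-- sort: it filters out x == 100 candidates, then repeatedly extracts the first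
-- minimum-y candidate and dispatches it directly into the first or second line;
-- objective: alternative algorithm (no library sort).

-- ===== PORT A =====
def convert (candidates : List (String × (Int × Int))) : String :=
  let st := candidates.foldl
    (fun (st : List (String × Int) × List (String × Int)) c =>
      if c.2.1 < 100 then (st.1 ++ [(c.1, c.2.2)], st.2)
      else if c.2.1 > 100 then (st.1, st.2 ++ [(c.1, c.2.2)]) else st)
    ([], [])
  let first_line := PySem.List.sorted st.1 (fun s => s.2)
  let second_line := PySem.List.sorted st.2 (fun s => s.2)
  if second_line.length = 0 then
    PySem.Str.join "" (first_line.map (fun e => e.1))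
  else
    PySem.Str.join "" (first_line.map (fun e => e.1)) ++ "-"
      ++ PySem.Str.join "" (second_line.map (fun e => e.1))

-- ===== PORT B =====
-- B's extract_min: the first item with minimal y-coordinate, and the remaining items
-- in order (= items[:best] + items[best+1:]); the Python index scan is rendered as
-- head/tail structural recursion computing the same pair on every input.
def selStep (x : String × (Int × Int)) : List (String × (Int × Int)) → (String × (Int × Int)) × List (String × (Int × Int))
  | [] => (x, [])
  | y :: ys =>
    let p := selStep y ys
    if p.1.2.2 < x.2.2 then (p.1, x :: p.2) else (x, y :: ys)

lemma selStep_length (x : String × (Int × Int)) (xs : List (String × (Int × Int))) :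
    (selStep x xs).2.length = xs.length := by
  induction xs generalizing x with
  | nil => rfl
  | cons y ys ih =>
    by_cases h : (selStep y ys).1.2.2 < x.2.2 <;> simp [selStep, h, ih y]

-- B's `while rest:` loop: pop the first minimum-y candidate, dispatch it.
def selLoop : List (String × (Int × Int)) → List String × List String
  | [] => ([], [])
  | x :: xs =>
    let p := selStep x xs
    let fs := selLoop p.2
    if p.1.2.1 < 100 then (p.1.1 :: fs.1, fs.2) else (fs.1, p.1.1 :: fs.2)
  termination_by l => l.length
  decreasing_by simp [selStep_length]

def convert_alt (candidates : List (String × (Int × Int))) : String :=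
  let rest := candidates.filter (fun c => decide (c.2.1 ≠ 100))
  let fs := selLoop rest
  let license_plate := PySem.Str.join "" fs.1
  if fs.2.isEmpty then license_plate
  else license_plate ++ "-" ++ PySem.Str.join "" fs.2

-- ===== PRECONDITION & SPEC =====
def Spec_convert (candidates : List (String × (Int × Int))) (out : String) : Prop := out = convert_alt candidates
instance (candidates : List (String × (Int × Int))) (out : String) : Decidable (Spec_convert candidates out) := by unfold Spec_convert; infer_instance

-- ===== CLAIM (what is proved, stated in full; the proofs are below) =====
def Claim_equal_convert : Prop := ∀ (candidates : List (String × (Int × Int))), Dom_convert candidates → Spec_convert candidates (convert candidates)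

-- ===== LEMMAS AND PROOFS =====

-- A's partition loop, in closed form (over any accumulator)
lemma foldA (xs : List (String × (Int × Int))) (a b : List (String × Int)) :
    xs.foldl
      (fun (st : List (String × Int) × List (String × Int)) c =>
        if c.2.1 < 100 then (st.1 ++ [(c.1, c.2.2)], st.2)
        else if c.2.1 > 100 then (st.1, st.2 ++ [(c.1, c.2.2)]) else st)
      (a, b)
    = (a ++ (xs.filter (fun c => c.2.1 < 100)).map (fun c => (c.1, c.2.2)),
       b ++ (xs.filter (fun c => c.2.1 > 100)).map (fun c => (c.1, c.2.2))) := by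
  induction xs generalizing a b with
  | nil => simp
  | cons x xs ih =>
    by_cases h1 : x.2.1 < 100
    · have h2 : ¬ x.2.1 > 100 := by omega
      simp [List.foldl_cons, h1, h2, ih]
    · by_cases h2 : x.2.1 > 100
      · simp [List.foldl_cons, h1, h2, ih]
      · simp [List.foldl_cons, h1, h2, ih]

-- insertion into a mapped list, when the key only looks at the mapped value
lemma insertBy_map {α β κ : Type} [LinearOrder κ] (key : β → κ) (f : α → β) (x : α) (ys : List α) :
    PySem.List.insertBy (fun a b => decide (key a < key b)) (f x) (ys.map f)
      = (PySem.List.insertBy (fun a b => decide (key (f a) < key (f b))) x ys).map f := by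
  induction ys with
  | nil => rfl
  | cons y ys ih =>
    by_cases h : key (f x) < key (f y)
    · simp [PySem.List.insertBy, h]
    · simp [PySem.List.insertBy, h, ih]

-- sorting a mapped list = mapping the list sorted by the composed key
lemma sorted_map' {α β κ : Type} [LinearOrder κ] (key : β → κ) (f : α → β) (xs : List α) :
    PySem.List.sorted (xs.map f) key false
      = (PySem.List.sorted xs (fun a => key (f a)) false).map f := by
  rw [PySem.List.sorted_eq_foldl_insertBy, PySem.List.sorted_eq_foldl_insertBy]
  have aux : ∀ (xs : List α) (acc : List α),
      (xs.map f).foldl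
        (fun acc x => PySem.List.insertBy (fun a b => decide (key a < key b)) x acc) (acc.map f)
      = (xs.foldl
          (fun acc x => PySem.List.insertBy (fun a b => decide (key (f a) < key (f b))) x acc)
          acc).map f := by
    intro xs
    induction xs with
    | nil => intro acc; rfl
    | cons x xs ih =>
      intro acc
      simp only [List.map_cons, List.foldl_cons]
      rw [insertBy_map key f x acc, ih]
  simpa using aux xs []

-- inserting below everything is a cons
lemma insertBy_eq_cons {α : Type} (bef : α → α → Bool) (x : α) (l : List α)
    (h : ∀ z ∈ l, bef x z = true) : PySem.List.insertBy bef x l = x :: l := by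
  cases l with
  | nil => rfl
  | cons z zs => simp [PySem.List.insertBy, h z (by simp)]

-- filtering commutes with insertion into an already key-sorted list
lemma filter_insertBy {α κ : Type} [LinearOrder κ] (key : α → κ) (p : α → Bool) (x : α)
    (acc : List α) (h : acc.Pairwise (fun a b => key a ≤ key b)) :
    (PySem.List.insertBy (fun a b => decide (key a < key b)) x acc).filter p
      = if p x then PySem.List.insertBy (fun a b => decide (key a < key b)) x (acc.filter p)
        else acc.filter p := by
  induction acc with
  | nil =>
    by_cases hp : p x <;> simp [PySem.List.insertBy, hp]
  | cons y ys ih =>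
    have hpw := (List.pairwise_cons.mp h).1
    have htl := (List.pairwise_cons.mp h).2
    by_cases hb : key x < key y
    · have hall : ∀ z ∈ (y :: ys).filter p, decide (key x < key z) = true := by
        intro z hz
        have hz' : z ∈ y :: ys := List.mem_of_mem_filter hz
        rcases List.mem_cons.mp hz' with rfl | hz''
        · simpa using hb
        · simpa using lt_of_lt_of_le hb (hpw z hz'')
      have hLHS : PySem.List.insertBy (fun a b => decide (key a < key b)) x (y :: ys)
          = x :: y :: ys := by simp [PySem.List.insertBy, hb]
      rw [hLHS]
      by_cases hp : p x
      · simp only [hp, if_true]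
        rw [insertBy_eq_cons _ _ _ hall]
        simp [List.filter_cons, hp]
      · simp [List.filter_cons, hp]
    · have hb' : decide (key x < key y) = false := by simpa using hb
      have hstep : PySem.List.insertBy (fun a b => decide (key a < key b)) x (y :: ys)
          = y :: PySem.List.insertBy (fun a b => decide (key a < key b)) x ys := by
        simp [PySem.List.insertBy, hb']
      rw [hstep]
      by_cases hpy : p y
      · simp only [List.filter_cons, hpy, if_pos]
        rw [ih htl]
        by_cases hp : p x
        · simp [hp, PySem.List.insertBy, hb']
        · simp [hp]
      · simp [hpy, ih htl]

-- stable sort commutes with filtering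
lemma sorted_filter' {α κ : Type} [LinearOrder κ] (key : α → κ) (p : α → Bool) (xs : List α) :
    (PySem.List.sorted xs key false).filter p
      = PySem.List.sorted (xs.filter p) key false := by
  rw [PySem.List.sorted_eq_foldl_insertBy, PySem.List.sorted_eq_foldl_insertBy]
  have aux : ∀ (xs : List α) (acc : List α),
      acc.Pairwise (fun a b => key a ≤ key b) →
      (xs.foldl (fun acc x => PySem.List.insertBy (fun a b => decide (key a < key b)) x acc)
          acc).filter p
        = (xs.filter p).foldl
            (fun acc x => PySem.List.insertBy (fun a b => decide (key a < key b)) x acc)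
            (acc.filter p) := by
    intro xs
    induction xs with
    | nil => intro acc _; rfl
    | cons x xs ih =>
      intro acc hacc
      simp only [List.foldl_cons, List.filter_cons]
      rw [ih _ (PySem.List.insertBy_pairwise_le key x acc hacc),
        filter_insertBy key p x acc hacc]
      by_cases hp : p x
      · simp [hp]
      · simp [hp]
  simpa using aux xs [] (by simp)

-- ---- selection-sort facts ----

-- the selected element's key is minimal
lemma selStep_key_le (x : String × (Int × Int)) (xs : List (String × (Int × Int))) :
    (selStep x xs).1.2.2 ≤ x.2.2 ∧ ∀ y ∈ xs, (selStep x xs).1.2.2 ≤ y.2.2 := by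
  induction xs generalizing x with
  | nil => simp [selStep]
  | cons y ys ih =>
    obtain ⟨h1, h2⟩ := ih y
    by_cases h : (selStep y ys).1.2.2 < x.2.2
    · refine ⟨?_, ?_⟩
      · simp only [selStep, if_pos h]; exact le_of_lt h
      · intro z hz
        simp only [selStep, if_pos h]
        rcases List.mem_cons.mp hz with rfl | hz'
        · exact h1
        · exact h2 z hz'
    · refine ⟨?_, ?_⟩
      · simp [selStep, h]
      · intro z hz
        simp only [selStep, if_neg h]
        rcases List.mem_cons.mp hz with rfl | hz'
        · exact le_trans (le_of_not_gt h) h1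
        · exact le_trans (le_of_not_gt h) (h2 z hz')

-- selStep permutes its input
lemma selStep_perm (x : String × (Int × Int)) (xs : List (String × (Int × Int))) :
    (x :: xs).Perm ((selStep x xs).1 :: (selStep x xs).2) := by
  induction xs generalizing x with
  | nil => simp [selStep]
  | cons y ys ih =>
    by_cases h : (selStep y ys).1.2.2 < x.2.2
    · simp only [selStep, if_pos h]
      exact (List.Perm.cons x (ih y)).trans (List.Perm.swap _ x _)
    · simp [selStep, h]

-- selStep preserves each equal-key fibre (stability)
lemma selStep_filter (x : String × (Int × Int)) (xs : List (String × (Int × Int))) (k : Int) :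
    ((selStep x xs).1 :: (selStep x xs).2).filter (fun a => decide (a.2.2 = k))
      = ((x :: xs)).filter (fun a => decide (a.2.2 = k)) := by
  induction xs generalizing x with
  | nil => simp [selStep]
  | cons y ys ih =>
    by_cases h : (selStep y ys).1.2.2 < x.2.2
    · simp only [selStep, if_pos h]
      have ihy := ih y
      by_cases hkx : x.2.2 = k
      · have hkm : ¬ ((selStep y ys).1.2.2 = k) := by omega
        simp [List.filter_cons, hkm, hkx] at ihy ⊢
        simp [ihy]
      · by_cases hkm : (selStep y ys).1.2.2 = k
        · simp [List.filter_cons, hkm, hkx] at ihy ⊢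
          simp [ihy]
        · simp [List.filter_cons, hkm, hkx] at ihy ⊢
          simp [ihy]
    · simp [selStep, h]

-- full selection sort (proof-side only; selLoop fuses it with the dispatch)
def selSort : List (String × (Int × Int)) → List (String × (Int × Int))
  | [] => []
  | x :: xs => (selStep x xs).1 :: selSort (selStep x xs).2
  termination_by l => l.length
  decreasing_by simp [selStep_length]

lemma selSort_unfold (x : String × (Int × Int)) (xs : List (String × (Int × Int))) :
    selSort (x :: xs) = (selStep x xs).1 :: selSort (selStep x xs).2 := by
  simp [selSort]

lemma selSort_perm (xs : List (String × (Int × Int))) : (selSort xs).Perm xs := by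
  induction xs using selSort.induct with
  | case1 => simp [selSort]
  | case2 x xs ih =>
    rw [selSort_unfold]
    exact (List.Perm.cons _ ih).trans (selStep_perm x xs).symm

lemma selSort_pairwise (xs : List (String × (Int × Int))) :
    (selSort xs).Pairwise (fun a b => a.2.2 ≤ b.2.2) := by
  induction xs using selSort.induct with
  | case1 => simp [selSort]
  | case2 x xs ih =>
    rw [selSort_unfold]
    refine List.pairwise_cons.mpr ⟨?_, ih⟩
    intro z hz
    have hz1 : z ∈ (selStep x xs).2 := (selSort_perm _).mem_iff.mp hz
    have hz2 : z ∈ x :: xs := (selStep_perm x xs).mem_iff.mpr (List.mem_cons_of_mem _ hz1)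
    rcases List.mem_cons.mp hz2 with h' | hz3
    · rw [h']; exact (selStep_key_le x xs).1
    · exact (selStep_key_le x xs).2 z hz3

lemma selSort_filter (xs : List (String × (Int × Int))) (k : Int) :
    (selSort xs).filter (fun a => decide (a.2.2 = k))
      = xs.filter (fun a => decide (a.2.2 = k)) := by
  induction xs using selSort.induct with
  | case1 => simp [selSort]
  | case2 x xs ih =>
    rw [selSort_unfold]
    have h1 : ((selStep x xs).1 :: selSort (selStep x xs).2).filter (fun a => decide (a.2.2 = k))
        = ((selStep x xs).1 :: (selStep x xs).2).filter (fun a => decide (a.2.2 = k)) := by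
      simp only [List.filter_cons, ih]
    rw [h1, selStep_filter]

-- a key-nondecreasing list is determined by its equal-key fibres
lemma stable_unique (l₁ l₂ : List (String × (Int × Int)))
    (h₁ : l₁.Pairwise (fun a b => a.2.2 ≤ b.2.2))
    (h₂ : l₂.Pairwise (fun a b => a.2.2 ≤ b.2.2))
    (hf : ∀ k, l₁.filter (fun a => decide (a.2.2 = k)) = l₂.filter (fun a => decide (a.2.2 = k))) :
    l₁ = l₂ := by
  induction l₁ generalizing l₂ with
  | nil =>
    cases l₂ with
    | nil => rfl
    | cons b t₂ =>
      exfalso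
      have h := hf b.2.2
      simp at h
  | cons a t₁ ih =>
    cases l₂ with
    | nil =>
      exfalso
      have h := hf a.2.2
      simp at h
    | cons b t₂ =>
      have ha_mem : a ∈ b :: t₂ := by
        have h := hf a.2.2
        have : a ∈ (b :: t₂).filter (fun x => decide (x.2.2 = a.2.2)) := by
          rw [← h]; simp [List.mem_filter]
        exact List.mem_of_mem_filter this
      have hb_mem : b ∈ a :: t₁ := by
        have h := hf b.2.2
        have : b ∈ (a :: t₁).filter (fun x => decide (x.2.2 = b.2.2)) := by
          rw [h]; simp [List.mem_filter]
        exact List.mem_of_mem_filter this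
      have hba : b.2.2 ≤ a.2.2 := by
        rcases List.mem_cons.mp ha_mem with h' | hm
        · subst h'; exact le_refl _
        · exact (List.pairwise_cons.mp h₂).1 a hm
      have hab : a.2.2 ≤ b.2.2 := by
        rcases List.mem_cons.mp hb_mem with h' | hm
        · subst h'; exact le_refl _
        · exact (List.pairwise_cons.mp h₁).1 b hm
      have hk : a.2.2 = b.2.2 := le_antisymm hab hba
      have hhead := hf a.2.2
      have hda : decide (a.2.2 = a.2.2) = true := by simp
      have hdb : decide (b.2.2 = a.2.2) = true := by simp [hk]
      simp only [List.filter_cons, hdb, if_true] at hhead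
      have hab' : a = b := (List.cons_eq_cons.mp hhead).1
      have hteq := (List.cons_eq_cons.mp hhead).2
      have htf : ∀ k', t₁.filter (fun x => decide (x.2.2 = k'))
          = t₂.filter (fun x => decide (x.2.2 = k')) := by
        intro k'
        by_cases hk' : k' = a.2.2
        · subst hk'
          exact hteq
        · have h := hf k'
          have hna : ¬ (a.2.2 = k') := fun h' => hk' h'.symm
          have hnb : ¬ (b.2.2 = k') := by rw [← hk]; exact hna
          simpa [List.filter_cons, hna, hnb] using h
      rw [hab', ih t₂ (List.pairwise_cons.mp h₁).2 (List.pairwise_cons.mp h₂).2 htf]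

lemma selSort_eq_sorted (xs : List (String × (Int × Int))) :
    selSort xs = PySem.List.sorted xs (fun c => c.2.2) false := by
  apply stable_unique _ _ (selSort_pairwise xs) (PySem.List.sorted_pairwise xs (fun c : String × (Int × Int) => c.2.2))
  intro k
  rw [selSort_filter, sorted_filter']
  have hconst : (xs.filter (fun a => decide (a.2.2 = k))).Pairwise (fun a b => a.2.2 ≤ b.2.2) := by
    apply List.pairwise_of_forall_mem_list
    intro a ha b hb
    have ha' : a.2.2 = k := by simpa using (List.mem_filter.mp ha).2
    have hb' : b.2.2 = k := by simpa using (List.mem_filter.mp hb).2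
    omega
  rw [PySem.List.sorted_eq_self_of_pairwise _ _ hconst]

lemma selLoop_unfold (x : String × (Int × Int)) (xs : List (String × (Int × Int))) :
    selLoop (x :: xs)
      = (if (selStep x xs).1.2.1 < 100
          then ((selStep x xs).1.1 :: (selLoop (selStep x xs).2).1, (selLoop (selStep x xs).2).2)
          else ((selLoop (selStep x xs).2).1, (selStep x xs).1.1 :: (selLoop (selStep x xs).2).2)) := by
  simp [selLoop]

lemma selLoop_eq (xs : List (String × (Int × Int))) :
    selLoop xs = (((selSort xs).filter (fun c => decide (c.2.1 < 100))).map Prod.fst,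
                  ((selSort xs).filter (fun c => !decide (c.2.1 < 100))).map Prod.fst) := by
  induction xs using selSort.induct with
  | case1 => simp [selLoop, selSort]
  | case2 x xs ih =>
    rw [selSort_unfold, selLoop_unfold]
    by_cases h : (selStep x xs).1.2.1 < 100
    · simp [h, ih]
    · simp [h, ih]

lemma filter_lt (l : List (String × (Int × Int))) :
    (l.filter (fun c => decide (c.2.1 ≠ 100))).filter (fun c => decide (c.2.1 < 100))
      = l.filter (fun c => c.2.1 < 100) := by
  rw [List.filter_filter]
  apply List.filter_congr
  intro c _
  by_cases h : c.2.1 < 100 <;> simp [h] <;> omega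

lemma filter_gt (l : List (String × (Int × Int))) :
    (l.filter (fun c => decide (c.2.1 ≠ 100))).filter (fun c => !decide (c.2.1 < 100))
      = l.filter (fun c => c.2.1 > 100) := by
  rw [List.filter_filter]
  apply List.filter_congr
  intro c _
  by_cases h : c.2.1 > 100 <;> simp [h] <;> omega

-- ===== VERDICT (by name: the statement is the Claim_ definition above) =====
theorem convert_spec : Claim_equal_convert := by
  intro xs _
  unfold Spec_convert convert convert_alt
  simp only [foldA, List.nil_append]
  simp only [selLoop_eq, selSort_eq_sorted]
  rw [sorted_filter', sorted_filter', filter_lt, filter_gt]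
  rw [sorted_map' (fun s : String × Int => s.2) (fun c : String × (Int × Int) => (c.1, c.2.2)),
    sorted_map' (fun s : String × Int => s.2) (fun c : String × (Int × Int) => (c.1, c.2.2))]
  simp only [List.map_map, List.length_map, List.isEmpty_map]
  simp only [List.isEmpty_iff, List.length_eq_zero_iff, Function.comp_def]
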